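-- pv_equiv track=rewrite | github.com/ChanLim-BD/DS-Algorithm | 과거 기록들/Programmers/LV.0/숫자 찾기.py | solution
-- ===== SOURCE A (Python) =====
-- def solution(num, k):
--     ls = []
--     st = str(num)
--     for i in st:
--         ls.append(int(i))
--     if k in ls:
--         return ls.index(k) + 1
--     else:
--         return -1
-- ===== SOURCE B (Python) =====
-- def solution(num, k):
--     # Arithmetic digit extraction: peel digits with % and // from the least
--     # significant end, remembering the digit-from-the-right position of the
--     # most significant match; no string conversion at all.
--     n, length, found = num, 0, -1
--     while n > 0:
--         if n % 10 == k:
--             found = length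
--         length += 1
--         n //= 10
--     if num == 0:
--         return 1 if k == 0 else -1
--     return length - found if found != -1 else -1
-- ===== Notes on version B (the rewrite author's own statement) =====
-- stated objective: alternative
-- what changed: B extracts digits arithmetically with % 10 and // 10 from the least significant end, tracking the from-the-right position of the most significant match, instead of A's string conversion followed by a membership test and an .index scan.
import Mathlib
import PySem

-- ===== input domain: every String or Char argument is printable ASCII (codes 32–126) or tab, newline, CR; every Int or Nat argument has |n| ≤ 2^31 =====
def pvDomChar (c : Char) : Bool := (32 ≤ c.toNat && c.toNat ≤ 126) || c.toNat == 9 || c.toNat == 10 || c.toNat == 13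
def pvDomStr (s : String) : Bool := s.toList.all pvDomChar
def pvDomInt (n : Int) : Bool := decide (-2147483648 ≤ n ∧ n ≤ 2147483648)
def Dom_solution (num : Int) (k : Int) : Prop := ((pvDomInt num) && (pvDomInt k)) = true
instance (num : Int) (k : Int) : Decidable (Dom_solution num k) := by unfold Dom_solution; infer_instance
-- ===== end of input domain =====

-- B peels the digits off num arithmetically (% 10, // 10) instead of A's string conversion
-- + membership test + .index scan (alternative algorithm, same cost).
-- A raises ValueError on num < 0 (int('-')); those inputs are outside Pre_solution.

-- ===== PORT A =====
-- int(i) for the single character i; the getD 0 default is unreachable under Pre_solution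
-- (num ≥ 0, so every character of str(num) is a decimal digit and int() returns).
def pvCharInt (c : Char) : Int := (PySem.Int.ofChars? [c]).getD 0

def solution (num : Int) (k : Int) : Int :=
  let st := PySem.Int.toChars num                 -- st = str(num)
  let ls := st.map pvCharInt                      -- for i in st: ls.append(int(i))
  if ls.contains k then
    ((PySem.List.index? ls k).getD 0 : Int) + 1   -- ls.index(k) + 1 (index? is some: k ∈ ls)
  else
    -1

-- ===== PORT B =====
-- while n > 0: if n % 10 == k: found = length; length += 1; n //= 10
def solutionAltLoop (k : Int) (n length found : Int) : Int × Int :=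
  if h : 0 < n then
    let found' := if PySem.Int.mod n 10 == k then length else found
    solutionAltLoop k (PySem.Int.floordiv n 10) (length + 1) found'
  else (length, found)
termination_by n.toNat
decreasing_by
  rw [PySem.Int.floordiv_eq_ediv_of_pos (by norm_num)]
  omega

def solution_alt (num : Int) (k : Int) : Int :=
  let r := solutionAltLoop k num 0 (-1)
  if num == 0 then (if k == 0 then 1 else -1)
  else if r.2 != -1 then r.1 - r.2 else -1

-- ===== PRECONDITION & SPEC =====
-- Pre_ excludes num < 0: there str(num) starts with '-' and int('-') raises ValueError in A.
def Pre_solution (num : Int) (k : Int) : Prop := 0 ≤ num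
instance (num : Int) (k : Int) : Decidable (Pre_solution num k) := by unfold Pre_solution; infer_instance
def pvWitness_solution : Int × Int := (123, 2)

def Spec_solution (num : Int) (k : Int) (out : Int) : Prop := out = solution_alt num k
instance (num : Int) (k : Int) (out : Int) : Decidable (Spec_solution num k out) := by unfold Spec_solution; infer_instance

-- ===== CLAIM (what is proved, stated in full; the proofs are below) =====
def Claim_equal_solution : Prop := ∀ (num : Int) (k : Int), Dom_solution num k → Pre_solution num k → Spec_solution num k (solution num k)

-- ===== LEMMAS AND PROOFS =====

-- the digit list of m, as A computes it
def pvDigs (m : Nat) : List Int := (Nat.toDigits 10 m).map pvCharInt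

theorem pvCharInt_digitChar {d : Nat} (hd : d < 10) : pvCharInt (Nat.digitChar d) = (d : Int) := by
  interval_cases d <;> decide

theorem pvDigs_lt (m : Nat) (hm : m < 10) : pvDigs m = [(m : Int)] := by
  unfold pvDigs
  rw [Nat.toDigits_of_lt_base hm, List.map_cons, List.map_nil, pvCharInt_digitChar hm]

theorem pvDigs_ge (m : Nat) (hm : 10 ≤ m) :
    pvDigs m = pvDigs (m / 10) ++ [((m % 10 : Nat) : Int)] := by
  unfold pvDigs
  rw [Nat.toDigits_of_base_le (by norm_num) hm, List.map_append, List.map_cons, List.map_nil,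
    pvCharInt_digitChar (Nat.mod_lt m (by norm_num))]

-- B's loop over m > 0: final counter = length + #digits; final 'found' = the counter value
-- at which the leftmost matching digit was processed (= length + distance from the right), else found.
theorem solutionAltLoop_eq (k : Int) (m : Nat) (hm : 0 < m) : ∀ (length found : Int),
    solutionAltLoop k (m : Int) length found =
      (length + (pvDigs m).length,
       match PySem.List.index? (pvDigs m) k with
       | some j => length + (((pvDigs m).length : Int) - 1 - (j : Int))
       | none => found) := by
  induction m using Nat.strong_induction_on with
  | _ m ih =>
    intro length found
    rw [solutionAltLoop]
    have hpos : (0 : Int) < (m : Int) := by exact_mod_cast hm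
    rw [dif_pos hpos]
    have hmod : PySem.Int.mod (m : Int) 10 = ((m % 10 : Nat) : Int) := by
      exact_mod_cast PySem.Int.mod_natCast m 10
    have hdiv : PySem.Int.floordiv (m : Int) 10 = ((m / 10 : Nat) : Int) := by
      exact_mod_cast PySem.Int.floordiv_natCast m 10
    by_cases hlt : m < 10
    · have hm10 : m / 10 = 0 := Nat.div_eq_of_lt hlt
      have hmod10 : m % 10 = m := Nat.mod_eq_of_lt hlt
      rw [hdiv, hm10, solutionAltLoop, dif_neg (by norm_num)]
      rw [pvDigs_lt m hlt, hmod, hmod10]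
      by_cases hk : (m : Int) = k
      · subst hk; rw [PySem.List.index?_cons_self]; simp
      · rw [PySem.List.index?_cons_of_ne _ hk]
        simp [hk, PySem.List.index?]
    · have hge : 10 ≤ m := by omega
      have hqpos : 0 < m / 10 := Nat.div_pos hge (by norm_num)
      have hqlt : m / 10 < m := Nat.div_lt_self hm (by norm_num)
      rw [hdiv, ih (m / 10) hqlt hqpos, pvDigs_ge m hge]
      rw [hmod]
      set d : Int := ((m % 10 : Nat) : Int) with hdd
      set xs := pvDigs (m / 10) with hxs
      cases hidx : PySem.List.index? xs k with
      | some j =>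
        have hmem : k ∈ xs := (PySem.List.index?_isSome_iff xs k).mp (by rw [hidx]; rfl)
        have hjlt : j < xs.length := (PySem.List.getElem_of_index?_eq_some hidx).1
        rw [PySem.List.index?_append_of_mem [d] hmem, hidx]
        simp only [Prod.mk.injEq, List.length_append, List.length_cons, List.length_nil]
        constructor <;> (push_cast; ring)
      | none =>
        have hnmem : k ∉ xs := (PySem.List.index?_eq_none_iff xs k).mp hidx
        by_cases hk : d = k
        · rw [hk, PySem.List.index?_append_singleton_self xs k hnmem]
          simp only [beq_self_eq_true, if_true, Prod.mk.injEq, List.length_append,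
            List.length_cons, List.length_nil]
          constructor <;> (push_cast; ring)
        · have hnone : PySem.List.index? (xs ++ [d]) k = none := by
            rw [PySem.List.index?_eq_none_iff]
            simp only [List.mem_append, List.mem_singleton]
            rintro (h | h)
            · exact hnmem h
            · exact hk h.symm
          rw [hnone]
          have hbk : (d == k) = false := by simp [hk]
          simp only [hbk, Prod.mk.injEq, List.length_append, List.length_cons,
            List.length_nil]
          constructor
          · push_cast; ring
          · rfl

-- A on num ≥ 0 reads the digits pvDigs num.toNat
theorem solution_eq_digs (num k : Int) (h : 0 ≤ num) :
    solution num k =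
      match PySem.List.index? (pvDigs num.toNat) k with
      | some j => (j : Int) + 1
      | none => -1 := by
  unfold solution
  have htc : PySem.Int.toChars num = Nat.toDigits 10 num.toNat := by
    unfold PySem.Int.toChars
    rw [if_neg (by omega)]
  rw [htc]
  cases hidx : PySem.List.index? (pvDigs num.toNat) k with
  | some j =>
    have hmem : k ∈ pvDigs num.toNat :=
      (PySem.List.index?_isSome_iff _ k).mp (by rw [hidx]; rfl)
    unfold pvDigs at hmem hidx
    simp only [hmem, List.contains_eq_mem, decide_true, if_true, hidx, Option.getD_some]
  | none =>
    have hnmem : k ∉ pvDigs num.toNat := (PySem.List.index?_eq_none_iff _ k).mp hidx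
    unfold pvDigs at hnmem
    simp [hnmem]

-- ===== VERDICT (by name: the statement is the Claim_ definition above) =====
theorem solution_spec : Claim_equal_solution := by
  intro num k _ hpre
  have hpre' : (0 : Int) ≤ num := hpre
  unfold Spec_solution
  rw [solution_eq_digs num k hpre']
  unfold solution_alt
  by_cases h0 : num = 0
  · subst h0
    have : pvDigs 0 = [0] := by decide
    rw [show (Int.toNat 0) = 0 from rfl, this]
    by_cases hk : k = 0
    · subst hk; rw [PySem.List.index?_cons_self]; simp
    · rw [PySem.List.index?_cons_of_ne _ (fun h => hk h.symm)]
      simp [PySem.List.index?, hk]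
  · have hm : 0 < num.toNat := by omega
    have hnum : ((num.toNat : Nat) : Int) = num := Int.toNat_of_nonneg hpre
    have hloop := solutionAltLoop_eq k num.toNat hm 0 (-1)
    rw [hnum] at hloop
    rw [hloop]
    simp only [beq_iff_eq, if_neg h0]
    cases hidx : PySem.List.index? (pvDigs num.toNat) k with
    | some j =>
      have hjlt : j < (pvDigs num.toNat).length := (PySem.List.getElem_of_index?_eq_some hidx).1
      have hne : (0 + (((pvDigs num.toNat).length : Int) - 1 - (j : Int)) != -1) = true := by
        simp only [bne_iff_ne, ne_eq]
        omega
      simp only [hne, if_true]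
      ring
    | none => simp
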